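-- pv_equiv track=rewrite | github.com/skybrush-io/studio-blender | src/modules/sbstudio/utils.py | get_ends
-- ===== SOURCE A (Python) =====
-- from collections.abc import Callable, Iterable, MutableMapping, Sequence
-- from typing import Any, Generic, TypeVar
--
-- T = TypeVar("T")
--
-- def get_ends(items: Iterable[T] | None) -> tuple[T, T] | None:
--     """
--     Returns the first and last item from the given iterable as a tuple if the
--     iterable is not empty, otherwise returns `None`.
--
--     If the iterable contains only one item, then first and last will be that one item.
--     """
--     if items is None:
--         return None
--
--     iterator = iter(items)
--     try:
--         first = last = next(iterator)
--     except StopIteration: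
--         return None
--
--     for item in iterator:
--         last = item
--
--     return (first, last)
-- ===== SOURCE B (Python) =====
-- def get_ends(items):
--     if items is None:
--         return None
--     lst = list(items)
--     if not lst:
--         return None
--     return (lst[0], lst[-1])
-- ===== Notes on version B (the rewrite author's own statement) =====
-- stated objective: simpler
-- what changed: Replaces the streaming first/last tracker (iterator, StopIteration handling, and a loop updating the last value) with materializing the list once and indexing its first and last elements directly.
import Mathlib
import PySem

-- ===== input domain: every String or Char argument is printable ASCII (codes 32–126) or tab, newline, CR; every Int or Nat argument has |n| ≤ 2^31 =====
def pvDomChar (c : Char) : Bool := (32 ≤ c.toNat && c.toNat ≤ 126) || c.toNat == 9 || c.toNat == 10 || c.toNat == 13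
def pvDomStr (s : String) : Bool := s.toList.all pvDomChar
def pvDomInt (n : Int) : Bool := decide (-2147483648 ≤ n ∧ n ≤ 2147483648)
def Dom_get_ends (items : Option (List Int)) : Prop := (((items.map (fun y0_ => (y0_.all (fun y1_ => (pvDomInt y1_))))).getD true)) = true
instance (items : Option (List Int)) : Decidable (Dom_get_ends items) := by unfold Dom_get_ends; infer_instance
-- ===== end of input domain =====

-- B replaces A's streaming first/last tracker with list materialization and direct end indexing (objective: simpler).
-- ===== PORT A =====
-- A: take the first element, then fold over the rest updating `last`.
def get_ends (items : Option (List Int)) : Option (Int × Int) :=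
  match items with
  | none => none
  | some xs =>
    match xs with
    | [] => none
    | first :: rest =>
      let last := rest.foldl (fun _ item => item) first
      some (first, last)

-- ===== PORT B =====
-- B: materialize the list; index 0 and -1 via PySem.List.pyGet?.
def get_ends_alt (items : Option (List Int)) : Option (Int × Int) :=
  match items with
  | none => none
  | some lst =>
    if lst.isEmpty then none
    else
      match PySem.List.pyGet? lst 0, PySem.List.pyGet? lst (-1) with
      | some a, some b => some (a, b)
      | _, _ => none

-- ===== PRECONDITION & SPEC =====
def Spec_get_ends (items : Option (List Int)) (out : Option (Int × Int)) : Prop := out = get_ends_alt items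
instance (items : Option (List Int)) (out : Option (Int × Int)) : Decidable (Spec_get_ends items out) := by unfold Spec_get_ends; infer_instance

-- ===== CLAIM (what is proved, stated in full; the proofs are below) =====
def Claim_equal_get_ends : Prop := ∀ (items : Option (List Int)), Dom_get_ends items → Spec_get_ends items (get_ends items)

-- ===== LEMMAS AND PROOFS =====

-- ===== VERDICT (by name: the statement is the Claim_ definition above) =====
lemma foldl_last (rest : List Int) (first : Int) :
    rest.foldl (fun _ item => item) first = rest.getLastD first := by
  induction rest generalizing first with
  | nil => rfl
  | cons x xs ih =>
    simp only [List.foldl, ih]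
    cases xs <;> simp [List.getLastD]

theorem get_ends_spec : Claim_equal_get_ends := by
  intro items _
  unfold Spec_get_ends get_ends get_ends_alt
  match items with
  | none => rfl
  | some [] => rfl
  | some (first :: rest) =>
    simp [foldl_last, PySem.List.pyGet?, PySem.List.pyIdx?]
    cases rest with
    | nil => rfl
    | cons y ys =>
      rw [List.getLast?_eq_some_getLast (List.cons_ne_nil y ys), List.getLast_eq_getElem]
      simp
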